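-- pv_equiv track=rewrite | github.com/GitMonsters/octotetrahedral-agi | arc-puzzle-catalog/re-arc/solves/678a5061/solver.py | find_non_background_cells
-- ===== SOURCE A (Python) =====
-- def find_non_background_cells(grid, background):
--     """Find all cells that are not the background color."""
--     cells = {}
--     for r in range(len(grid)):
--         for c in range(len(grid[0])):
--             if grid[r][c] != background:
--                 color = grid[r][c]
--                 if color not in cells:
--                     cells[color] = []
--                 cells[color].append((r, c))
--     return cells
-- ===== SOURCE B (Python) =====
-- def find_non_background_cells(grid, background):
--     """Find all cells that are not the background color."""
--     width = len(grid[0]) if grid else 0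
--     flat = [(grid[r][c], (r, c))
--             for r in range(len(grid))
--             for c in range(width)
--             if grid[r][c] != background]
--     order = list(dict.fromkeys(color for color, _ in flat))
--     return {color: [pos for col, pos in flat if col == color] for color in order}
-- ===== Notes on version B (the rewrite author's own statement) =====
-- stated objective: alternative
-- what changed: Instead of incrementally growing per-color lists in a dict during the scan, B collects all non-background cells into one flat row-major list, dedups the colors in first-appearance order, and builds each bucket by filtering the flat list per color.
import Mathlib
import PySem

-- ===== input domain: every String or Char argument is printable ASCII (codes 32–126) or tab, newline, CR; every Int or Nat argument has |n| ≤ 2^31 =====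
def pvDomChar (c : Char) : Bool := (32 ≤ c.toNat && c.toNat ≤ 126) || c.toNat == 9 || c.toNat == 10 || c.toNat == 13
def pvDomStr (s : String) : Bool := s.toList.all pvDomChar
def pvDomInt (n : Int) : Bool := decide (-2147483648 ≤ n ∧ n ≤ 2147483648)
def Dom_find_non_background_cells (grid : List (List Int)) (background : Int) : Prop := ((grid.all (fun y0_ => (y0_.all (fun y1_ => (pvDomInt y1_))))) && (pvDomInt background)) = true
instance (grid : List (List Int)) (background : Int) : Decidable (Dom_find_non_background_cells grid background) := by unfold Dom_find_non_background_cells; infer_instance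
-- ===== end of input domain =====

-- B replaces A's incremental dict-of-lists build by a flat scan + dedup of colors + one filter pass per color
-- (objective: alternative decomposition, same results including key order).

-- ===== PORT A =====
def find_non_background_cells (grid : List (List Int)) (background : Int) : List (Int × List (Int × Int)) :=
  ((PySem.List.pyRange 0 (grid.length : Int)).foldl (fun cells r =>
    (PySem.List.pyRange 0 (((PySem.List.pyGet? grid 0).getD []).length : Int)).foldl (fun cells c =>
      match PySem.List.pyGet? grid r with
      | some row =>
        match PySem.List.pyGet? row c with
        | some v =>
          if v ≠ background then
            let cells := if cells.contains v then cells else cells.insert v []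
            cells.modify v [] (fun l => l ++ [(r, c)])
          else cells
        | none => cells   -- Python raises IndexError here; excluded by Pre_
      | none => cells     -- unreachable: r < len(grid)
      ) cells) PySem.Dict.empty).items

-- ===== PORT B =====
def find_non_background_cells_alt (grid : List (List Int)) (background : Int) : List (Int × List (Int × Int)) :=
  let width : Int := if grid = [] then 0 else (((PySem.List.pyGet? grid 0).getD []).length : Int)
  let flat : List (Int × (Int × Int)) :=
    (PySem.List.pyRange 0 (grid.length : Int)).flatMap (fun r =>
      (PySem.List.pyRange 0 width).filterMap (fun c =>
        match PySem.List.pyGet? grid r with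
        | some row =>
          match PySem.List.pyGet? row c with
          | some v => if v ≠ background then some (v, (r, c)) else none
          | none => none  -- Python raises IndexError here; excluded by Pre_
        | none => none))
  (PySem.List.dedup (flat.map Prod.fst)).map (fun color =>
    (color, (flat.filter (fun p => p.1 == color)).map Prod.snd))

-- ===== PRECONDITION & SPEC =====
-- Pre_ excludes exactly the ragged grids on which Python A raises IndexError
-- (some row shorter than the first row, whose length is used as the width).
def Pre_find_non_background_cells (grid : List (List Int)) (_background : Int) : Prop :=
  ∀ row ∈ grid, (grid.headD []).length ≤ row.length
instance (grid : List (List Int)) (background : Int) : Decidable (Pre_find_non_background_cells grid background) := by unfold Pre_find_non_background_cells; infer_instance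
def pvWitness_find_non_background_cells : List (List Int) × Int := ([[1, 2], [2, 0]], 0)

def Spec_find_non_background_cells (grid : List (List Int)) (background : Int) (out : List (Int × List (Int × Int))) : Prop := out = find_non_background_cells_alt grid background
instance (grid : List (List Int)) (background : Int) (out : List (Int × List (Int × Int))) : Decidable (Spec_find_non_background_cells grid background out) := by unfold Spec_find_non_background_cells; infer_instance

-- ===== CLAIM (what is proved, stated in full; the proofs are below) =====
def Claim_equal_find_non_background_cells : Prop := ∀ (grid : List (List Int)) (background : Int), Dom_find_non_background_cells grid background → Pre_find_non_background_cells grid background → Spec_find_non_background_cells grid background (find_non_background_cells grid background)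

-- ===== LEMMAS AND PROOFS =====

-- the cell-extraction step shared (after simplification) by both ports
def pvPick (grid : List (List Int)) (background : Int) (r c : Int) : Option (Int × (Int × Int)) :=
  match PySem.List.pyGet? grid r with
  | some row =>
    match PySem.List.pyGet? row c with
    | some v => if v ≠ background then some (v, (r, c)) else none
    | none => none
  | none => none

-- a fold that skips `none`s of h is a fold over `filterMap h`
theorem pvFoldl_filterMap {α β γ : Type} (l : List α) (h : α → Option β) (g : γ → β → γ) (init : γ) :
    (l.filterMap h).foldl g init
      = l.foldl (fun d x => match h x with | some p => g d p | none => d) init := by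
  induction l generalizing init with
  | nil => rfl
  | cons a t ih =>
    cases hx : h a <;> simp [hx, ih]

-- grouping a flat (color, pos) list with repeated `d.modify color [] (· ++ [pos])`
-- yields exactly: dedup of the colors, each paired with the filtered positions
theorem pvGroup_items (F : List (Int × (Int × Int))) :
    (F.foldl (fun d p => d.modify p.1 [] (fun l => l ++ [p.2])) PySem.Dict.empty).items
      = (PySem.List.dedup (F.map Prod.fst)).map
          (fun k => (k, (F.filter (fun p => p.1 == k)).map Prod.snd)) := by
  have hnd : (F.foldl (fun d p => d.modify p.1 [] (fun l => l ++ [p.2])) PySem.Dict.empty).keys.Nodup := by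
    refine PySem.Dict.nodup_keys_foldl_modify_key F Prod.fst [] (fun _ p => (fun l => l ++ [p.2])) _ ?_
    simp [PySem.Dict.keys_empty]
  rw [PySem.Dict.items_eq_map_keys _ hnd []]
  rw [PySem.Dict.keys_foldl_modify_key F Prod.fst [] (fun _ p => (fun l => l ++ [p.2]))]
  have hkeys : PySem.Set.update (PySem.Dict.empty : PySem.Dict Int (List (Int × Int))).keys (F.map Prod.fst)
      = PySem.List.dedup (F.map Prod.fst) := by
    simp [PySem.Set.update, PySem.Dict.keys_empty, PySem.List.dedup_eq_ofList, PySem.Set.ofList_eq_foldl]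
  rw [hkeys]
  refine List.map_congr_left (fun k _ => ?_)
  rw [PySem.Dict.getD_foldl_modify_append]
  simp [PySem.Dict.getD_empty]

-- ===== VERDICT (by name: the statement is the Claim_ definition above) =====
theorem find_non_background_cells_spec : Claim_equal_find_non_background_cells := by
  intro grid background _ _
  unfold Spec_find_non_background_cells find_non_background_cells find_non_background_cells_alt
  -- B's width equals A's (len(grid[0]) computed totally)
  have hw : (if grid = [] then (0 : Int) else (((PySem.List.pyGet? grid 0).getD []).length : Int))
      = (((PySem.List.pyGet? grid 0).getD []).length : Int) := by
    cases grid <;> simp [PySem.List.pyGet?]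
  rw [hw]
  set W : Int := (((PySem.List.pyGet? grid 0).getD []).length : Int) with hW
  -- rewrite A's inner loop body via pvStepA, then fold shapes
  have hA : ((PySem.List.pyRange 0 (grid.length : Int)).foldl (fun cells r =>
      (PySem.List.pyRange 0 W).foldl (fun cells c =>
        match PySem.List.pyGet? grid r with
        | some row =>
          match PySem.List.pyGet? row c with
          | some v =>
            if v ≠ background then
              let cells := if cells.contains v then cells else cells.insert v []
              cells.modify v [] (fun l => l ++ [(r, c)])
            else cells
          | none => cells
        | none => cells) cells) PySem.Dict.empty)
      = (((PySem.List.pyRange 0 (grid.length : Int)).flatMap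
          (fun r => (PySem.List.pyRange 0 W).filterMap (pvPick grid background r))).foldl
            (fun d p => d.modify p.1 [] (fun l => l ++ [p.2])) PySem.Dict.empty) := by
    rw [List.foldl_flatMap]
    apply PySem.List.foldl_congr_mem
    intro cells r _
    rw [pvFoldl_filterMap]
    apply PySem.List.foldl_congr_mem
    intro d c _
    unfold pvPick
    cases hg : PySem.List.pyGet? grid r with
    | none => rfl
    | some row =>
      dsimp only
      cases hrc : PySem.List.pyGet? row c with
      | none => rfl
      | some v =>
        dsimp only
        by_cases hv : v = background
        · simp [hv]
        · simp only [ne_eq, hv, not_false_eq_true, if_true]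
          by_cases hc : d.contains v
          · simp [hc]
          · simp only [Bool.not_eq_true] at hc
            simp only [hc, Bool.false_eq_true, if_false]
            simp [PySem.Dict.modify, PySem.Dict.insert_insert_self,
              PySem.Dict.getD_insert_self, PySem.Dict.getD_of_not_contains, hc]
  rw [hA, pvGroup_items]
  rfl
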